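-- pv_equiv track=rewrite | github.com/hayoung-99/algorithm | 프로그래머스/3/64064. 불량 사용자/불량 사용자.py | solution
-- ===== SOURCE A (Python) =====
-- from itertools import combinations, permutations
--
-- def match(a, b):
--     if len(a) != len(b):
--         return False
--
--     for i in range(len(a)):
--         if b[i] != '*' and a[i] != b[i]:
--             return False
--
--     return True
--
-- def solution(user_id, banned_id):
--     answer = 0
--
--     # 1. 후보 목록 생성
--     for combi in combinations(user_id, len(banned_id)):
--         # 2. 후보 목록의 '순서'에 맞게 banned_id 목록 생성
--         for perm in permutations(banned_id, len(banned_id)):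
--             matches = 0
--             # 3. 후보 목록과 banned_id가 일치하면 다음 후보 목록 탐색
--             for target, curr_banned_id in zip(combi, perm):
--                 if match(target, curr_banned_id):
--                     matches += 1
--                 else:
--                     break
--
--             if matches == len(banned_id):
--                 answer += 1
--                 break
--
--     return answer
-- ===== SOURCE B (Python) =====
-- def match(a, b):
--     return len(a) == len(b) and all(y == '*' or x == y for x, y in zip(a, b))
--
-- def assignable(users, patterns):
--     # can the users be matched one-to-one onto the patterns?
--     if not users:
--         return not patterns
--     u = users[0]
--     return any(
--         match(u, p) and assignable(users[1:], patterns[:j] + patterns[j + 1:])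
--         for j, p in enumerate(patterns)
--     )
--
-- def solution(user_id, banned_id):
--     k = len(banned_id)
--
--     def count(users, chosen):
--         if len(chosen) == k:
--             return 1 if assignable(chosen, banned_id) else 0
--         if not users:
--             return 0
--         return count(users[1:], chosen + [users[0]]) + count(users[1:], chosen)
--
--     return count(user_id, [])
-- ===== Notes on version B (the rewrite author's own statement) =====
-- stated objective: alternative
-- what changed: Replaces itertools.combinations x full permutations(banned_id) scanning (with manual prefix-match counting and breaks) by a choose/skip recursion over user_id plus a backtracking one-to-one assignment check per chosen subset, which abandons a partial assignment as soon as a prefix cannot be extended instead of re-checking that failing prefix in every remaining permutation.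
import Mathlib
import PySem

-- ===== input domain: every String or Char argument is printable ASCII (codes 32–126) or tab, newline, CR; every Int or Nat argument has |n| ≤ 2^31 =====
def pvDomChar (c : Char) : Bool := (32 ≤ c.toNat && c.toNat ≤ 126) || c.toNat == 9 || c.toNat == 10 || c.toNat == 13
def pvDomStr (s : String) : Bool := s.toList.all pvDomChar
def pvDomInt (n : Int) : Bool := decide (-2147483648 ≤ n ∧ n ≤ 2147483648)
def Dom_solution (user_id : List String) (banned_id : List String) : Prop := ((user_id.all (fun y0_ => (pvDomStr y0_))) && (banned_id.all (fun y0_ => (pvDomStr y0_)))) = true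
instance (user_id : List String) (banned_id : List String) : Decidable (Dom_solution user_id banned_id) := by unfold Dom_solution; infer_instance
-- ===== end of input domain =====

-- B replaces A's itertools combinations × permutations scan by a choose/skip recursion over the
-- users with a backtracking one-to-one assignment check per subset (objective: alternative).

-- ===== PORT A =====

-- match(a, b): length check, then index loop with early False (loop over equal-length lists)
def matchLoopA : List Char → List Char → Bool
  | a :: as, b :: bs => if b ≠ '*' ∧ a ≠ b then false else matchLoopA as bs
  | _, _ => true

def matchA (a b : String) : Bool :=
  if a.toList.length ≠ b.toList.length then false else matchLoopA a.toList b.toList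

-- itertools.combinations(l, k) (lexicographic by position)
def combosA : Nat → List String → List (List String)
  | 0, _ => [[]]
  | _ + 1, [] => []
  | k + 1, x :: xs => (combosA k xs).map (x :: ·) ++ combosA (k + 1) xs

-- itertools.permutations: pick each element in position order, keep the rest in order
def picksA : List String → List (String × List String)
  | [] => []
  | x :: xs => (x, xs) :: (picksA xs).map (fun p => (p.1, x :: p.2))

def permsAux : Nat → List String → List (List String)
  | 0, _ => [[]]
  | n + 1, l => (picksA l).flatMap (fun p => (permsAux n p.2).map (p.1 :: ·))

def permsA (l : List String) : List (List String) := permsAux l.length l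

-- inner 'for target, curr_banned_id in zip(...)' loop: matches counter with break
def cmCount : List String → List String → Int
  | t :: ts, b :: bs => if matchA t b then 1 + cmCount ts bs else 0
  | _, _ => 0

-- 'for perm in permutations(...)' loop with the break after answer += 1
def anyPermA (combi : List String) (k : Int) : List (List String) → Bool
  | [] => false
  | q :: qs => if cmCount combi q = k then true else anyPermA combi k qs

def solution (user_id : List String) (banned_id : List String) : Int :=
  (combosA banned_id.length user_id).foldl
    (fun answer combi =>
      if anyPermA combi (banned_id.length : Int) (permsA banned_id) then answer + 1 else answer)
    0

-- ===== PORT B =====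

-- match(a, b) = len equal and all zipped chars agree (pattern char '*' is a wildcard)
def matchB (a b : String) : Bool :=
  a.toList.length == b.toList.length &&
    (a.toList.zip b.toList).all (fun xy => xy.2 == '*' || xy.1 == xy.2)

-- enumerate(patterns) paired with patterns[:j] + patterns[j+1:]
def picksB : List String → List (String × List String)
  | [] => []
  | x :: xs => (x, xs) :: (picksB xs).map (fun p => (p.1, x :: p.2))

-- assignable(users, patterns): backtracking one-to-one assignment
def assignableB : List String → List String → Bool
  | [], pats => pats.isEmpty
  | u :: us, pats => (picksB pats).any (fun p => matchB u p.1 && assignableB us p.2)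

-- count(users, chosen): choose/skip recursion over the users
def countB (banned : List String) (k : Nat) (users chosen : List String) : Int :=
  if chosen.length = k then (if assignableB chosen banned then 1 else 0)
  else
    match users with
    | [] => 0
    | u :: us => countB banned k us (chosen ++ [u]) + countB banned k us chosen
termination_by users

def solution_alt (user_id : List String) (banned_id : List String) : Int :=
  countB banned_id banned_id.length user_id []

-- ===== PRECONDITION & SPEC =====
def Spec_solution (user_id : List String) (banned_id : List String) (out : Int) : Prop := out = solution_alt user_id banned_id
instance (user_id : List String) (banned_id : List String) (out : Int) : Decidable (Spec_solution user_id banned_id out) := by unfold Spec_solution; infer_instance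

-- ===== CLAIM (what is proved, stated in full; the proofs are below) =====
def Claim_equal_solution : Prop := ∀ (user_id : List String) (banned_id : List String), Dom_solution user_id banned_id → Spec_solution user_id banned_id (solution user_id banned_id)

-- ===== LEMMAS AND PROOFS =====

theorem match_eq (a b : String) : matchA a b = matchB a b := by
  unfold matchA matchB
  generalize a.toList = as
  generalize b.toList = bs
  induction as generalizing bs with
  | nil => cases bs <;> simp [matchLoopA]
  | cons x xs ih =>
    cases bs with
    | nil => simp [matchLoopA]
    | cons y ys =>
      by_cases hl : xs.length = ys.length
      · have ihe := ih ys
        simp only [hl, ne_eq, not_true_eq_false, if_false, beq_self_eq_true,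
          Bool.true_and] at ihe
        by_cases hy : y = '*'
        · simp [hl, matchLoopA, hy, ihe]
        · by_cases hxy : x = y
          · simp [hl, matchLoopA, hy, hxy, ihe]
          · simp [hl, matchLoopA, hy, hxy]
      · simp [hl]

theorem picks_eq (l : List String) : picksA l = picksB l := by
  induction l with
  | nil => rfl
  | cons x xs ih => simp [picksA, picksB, ih]

theorem picks_snd_length (l : List String) :
    ∀ p ∈ picksA l, p.2.length + 1 = l.length := by
  induction l with
  | nil => intro p h; simp [picksA] at h
  | cons x xs ih =>
    intro p hp
    simp only [picksA, List.mem_cons, List.mem_map] at hp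
    rcases hp with h | ⟨q, hq, rfl⟩
    · subst h; simp
    · simpa using ih q hq

theorem permsAux_length (n : Nat) :
    ∀ (l : List String), l.length = n → ∀ q ∈ permsAux n l, q.length = n := by
  induction n with
  | zero => intro l hl q hq; simp [permsAux] at hq; simp [hq]
  | succ n ih =>
    intro l hl q hq
    simp only [permsAux, List.mem_flatMap, List.mem_map] at hq
    obtain ⟨p, hp, q', hq', rfl⟩ := hq
    have h2 := picks_snd_length l p hp
    have := ih p.2 (by omega) q' hq'
    simp [this]

theorem perms_length (l : List String) : ∀ q ∈ permsA l, q.length = l.length :=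
  permsAux_length l.length l rfl

theorem cmCount_full (c q : List String) (h : c.length = q.length) :
    (cmCount c q = (q.length : Int)) ↔ ((c.zip q).all (fun p => matchA p.1 p.2) = true) := by
  induction c generalizing q with
  | nil => cases q <;> simp_all [cmCount]
  | cons t ts ih =>
    cases q with
    | nil => simp at h
    | cons b bs =>
      by_cases hm : matchA t b = true
      · have hih := ih bs (by simpa using h)
        simp only [cmCount, hm, if_true, List.zip_cons_cons, List.all_cons, Bool.true_and,
          List.length_cons]
        rw [← hih]
        push_cast
        omega
      · simp only [cmCount, hm, if_false, List.zip_cons_cons, List.all_cons, List.length_cons]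
        simp only [hm, Bool.false_and]
        push_cast
        constructor
        · intro h0; omega
        · intro h0; exact absurd h0 (by simp)

theorem anyPermA_eq_any (combi : List String) (k : Int) (qs : List (List String)) :
    anyPermA combi k qs = qs.any (fun q => cmCount combi q == k) := by
  induction qs with
  | nil => rfl
  | cons q qs ih =>
    by_cases hq : cmCount combi q = k <;> simp [anyPermA, hq, ih]

theorem mem_permsA_cons (pats : List String) (n : Nat) (hn : pats.length = n + 1)
    (q : List String) :
    q ∈ permsA pats ↔ ∃ p ∈ picksA pats, ∃ q' ∈ permsA p.2, q = p.1 :: q' := by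
  unfold permsA
  rw [hn]
  simp only [permsAux, List.mem_flatMap, List.mem_map]
  constructor
  · rintro ⟨p, hp, q', hq', rfl⟩
    have hl : p.2.length = n := by have := picks_snd_length pats p hp; omega
    exact ⟨p, hp, q', by rw [hl]; exact hq', rfl⟩
  · rintro ⟨p, hp, q', hq', rfl⟩
    have hl : p.2.length = n := by have := picks_snd_length pats p hp; omega
    rw [hl] at hq'
    exact ⟨p, hp, q', hq', rfl⟩

-- the permutation scan with break equals B's backtracking assignment check (equal lengths)
theorem perm_exists_eq_assignable (combi : List String) :
    ∀ pats : List String, combi.length = pats.length →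
      (permsA pats).any (fun q => (combi.zip q).all (fun p => matchA p.1 p.2))
        = assignableB combi pats := by
  induction combi with
  | nil =>
    intro pats h
    cases pats with
    | nil => simp [permsA, permsAux, assignableB]
    | cons p ps => simp at h
  | cons u us ih =>
    intro pats h
    rw [Bool.eq_iff_iff]
    simp only [List.any_eq_true]
    rw [show assignableB (u :: us) pats
          = (picksB pats).any (fun p => matchB u p.1 && assignableB us p.2) from rfl]
    simp only [List.any_eq_true, Bool.and_eq_true, ← picks_eq]
    constructor
    · rintro ⟨q, hq, hall⟩
      rw [mem_permsA_cons pats us.length (by simpa using h.symm)] at hq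
      obtain ⟨p, hp, q', hq', rfl⟩ := hq
      simp only [List.zip_cons_cons, List.all_cons, Bool.and_eq_true] at hall
      refine ⟨p, hp, by rw [← match_eq]; exact hall.1, ?_⟩
      rw [← ih p.2 (by
        have h1 := picks_snd_length pats p hp
        have h2 : us.length + 1 = pats.length := by simpa using h
        omega)]
      simp only [List.any_eq_true]
      exact ⟨q', hq', hall.2⟩
    · rintro ⟨p, hp, hm, ha⟩
      rw [← ih p.2 (by
        have h1 := picks_snd_length pats p hp
        have h2 : us.length + 1 = pats.length := by simpa using h
        omega)] at ha
      simp only [List.any_eq_true] at ha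
      obtain ⟨q', hq', hall⟩ := ha
      refine ⟨p.1 :: q', ?_, ?_⟩
      · rw [mem_permsA_cons pats us.length (by simpa using h.symm)]
        exact ⟨p, hp, q', hq', rfl⟩
      · simp only [List.zip_cons_cons, List.all_cons, Bool.and_eq_true]
        exact ⟨by rw [match_eq]; exact hm, hall⟩

theorem anyPerm_eq_assignable (combi pats : List String) (h : combi.length = pats.length) :
    anyPermA combi (pats.length : Int) (permsA pats) = assignableB combi pats := by
  rw [anyPermA_eq_any, ← perm_exists_eq_assignable combi pats h]
  have hcong : ∀ (L : List (List String)), (∀ q ∈ L, q.length = pats.length) →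
      L.any (fun q => cmCount combi q == (pats.length : Int))
        = L.any (fun q => (combi.zip q).all (fun p => matchA p.1 p.2)) := by
    intro L hL
    induction L with
    | nil => rfl
    | cons q qs ihq =>
      simp only [List.any_cons]
      rw [ihq (fun x hx => hL x (List.mem_cons_of_mem _ hx))]
      have hq : q.length = pats.length := hL q (List.mem_cons_self ..)
      congr 1
      rw [Bool.eq_iff_iff]
      simp only [beq_iff_eq]
      rw [← hq]
      exact cmCount_full combi q (by omega)
  exact hcong (permsA pats) (perms_length pats)

-- foldl counting equals countP
theorem foldl_count (l : List (List String)) (f : List String → Bool) (a : Int) :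
    l.foldl (fun acc c => if f c then acc + 1 else acc) a = a + (l.countP f : Int) := by
  induction l generalizing a with
  | nil => simp
  | cons c cs ih =>
    by_cases hc : f c <;> simp [List.foldl, hc, ih, List.countP_cons] <;> ring

theorem combos_length (k : Nat) (l : List String) :
    ∀ c ∈ combosA k l, c.length = k := by
  induction l generalizing k with
  | nil => intro c hc; cases k <;> simp [combosA] at hc <;> simp [hc]
  | cons x xs ih =>
    intro c hc
    cases k with
    | zero => simp [combosA] at hc; simp [hc]
    | succ k =>
      simp only [combosA, List.mem_append, List.mem_map] at hc
      rcases hc with ⟨c', hc', rfl⟩ | hc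
      · simp [ih k c' hc']
      · exact ih (k+1) c hc

-- B's recursion counts, among the extensions of `chosen`, those full subsets that are assignable
theorem countB_eq (banned : List String) (k : Nat) (users : List String) :
    ∀ chosen : List String, chosen.length ≤ k →
      countB banned k users chosen =
        ((combosA (k - chosen.length) users).countP
          (fun c => assignableB (chosen ++ c) banned) : Int) := by
  induction users with
  | nil =>
    intro chosen hle
    by_cases h : chosen.length = k
    · rw [countB]
      simp only [h, if_true, Nat.sub_self, combosA, List.countP_cons, List.countP_nil,
        List.append_nil]
      by_cases ha : assignableB chosen banned <;> simp [ha]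
    · rw [countB]; simp only [h, if_false]
      have : k - chosen.length = (k - chosen.length - 1) + 1 := by omega
      rw [this]; simp [combosA]
  | cons u us ih =>
    intro chosen hle
    by_cases h : chosen.length = k
    · rw [countB]
      simp only [h, if_true, Nat.sub_self, combosA, List.countP_cons, List.countP_nil,
        List.append_nil]
      by_cases ha : assignableB chosen banned <;> simp [ha]
    · rw [countB]; simp only [h, if_false]
      have hm : k - chosen.length = (k - (chosen.length + 1)) + 1 := by omega
      have h1 := ih (chosen ++ [u]) (by simp; omega)
      have h2 := ih chosen hle
      rw [show (chosen ++ [u]).length = chosen.length + 1 by simp] at h1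
      rw [hm, combosA, List.countP_append, List.countP_map, ← hm]
      rw [h1, h2]
      push_cast
      congr 1
      congr 1
      apply List.countP_congr
      intro c _
      simp [Function.comp, List.append_assoc]

-- ===== VERDICT (by name: the statement is the Claim_ definition above) =====
theorem solution_spec : Claim_equal_solution := by
  intro user banned _
  unfold Spec_solution solution solution_alt
  rw [foldl_count]
  rw [countB_eq banned banned.length user [] (by simp)]
  simp only [List.length_nil, Nat.sub_zero, List.nil_append, Int.zero_add]
  congr 1
  apply List.countP_congr
  intro c hc
  have hlen := combos_length banned.length user c hc
  simp [anyPerm_eq_assignable c banned hlen]
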